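-- pv_equiv track=rewrite | github.com/crocodileDaniil/express-python_for-ml | les1/ex08/names_extractor.py | get_content_line
-- ===== SOURCE A (Python) =====
-- def get_content_line(line):
--     separator_result = '\t'
--     separator_initials = '.'
--     end_initials = '@'
--     end_line = '\n'
--     email_pattern = '@corp.com'
--     result = ''
--     is_upper = True
--
--     for ch in line:
--       if ch == separator_initials:
--          result += separator_result
--          is_upper = True
--          continue
--       if ch == end_initials:
--          result = result + separator_result + line
--          break
--       result += ch.upper() if is_upper else ch
--       is_upper = False
--     # можно ввести доп проверку если была ошибка в данных
--     # if email_pattern not in line: result = result + separator_result + 'check email in source data'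
--
--     return result + end_line
-- ===== SOURCE B (Python) =====
-- def get_content_line(line):
--     idx = line.find('@')
--     prefix = line if idx == -1 else line[:idx]
--     body = '\t'.join(s[:1].upper() + s[1:] for s in prefix.split('.'))
--     if idx == -1:
--         return body + '\n'
--     return body + '\t' + line + '\n'
-- ===== Notes on version B (the rewrite author's own statement) =====
-- stated objective: faster
-- what changed: Replaced A's character-by-character scan with its uppercase-flag state and quadratic string concatenation by an index find of the email marker, a split on the initials separator, per-segment first-char uppercase, and a join; one pass with linear string building.
import Mathlib
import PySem

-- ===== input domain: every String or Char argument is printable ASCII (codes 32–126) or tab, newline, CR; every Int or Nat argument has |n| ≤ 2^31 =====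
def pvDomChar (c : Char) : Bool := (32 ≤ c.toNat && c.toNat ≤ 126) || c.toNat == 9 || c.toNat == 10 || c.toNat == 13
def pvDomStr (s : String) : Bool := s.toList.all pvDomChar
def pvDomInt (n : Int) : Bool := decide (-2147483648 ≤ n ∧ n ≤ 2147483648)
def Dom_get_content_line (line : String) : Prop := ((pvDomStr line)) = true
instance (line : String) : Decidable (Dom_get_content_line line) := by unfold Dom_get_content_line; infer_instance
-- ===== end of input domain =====

-- B replaces A's char-by-char scan (uppercase flag, break at the email marker, quadratic
-- string concatenation) by find + split + per-segment first-char uppercase + join (measured faster).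

-- ===== PORT A =====
-- A's for-loop: state (result, is_upper); '.' appends a tab and resets is_upper,
-- '@' appends a tab plus the whole line and breaks, otherwise append ch (uppercased if is_upper)
def pvGoA (line : List Char) : List Char → List Char → Bool → List Char
  | [], res, _ => res
  | c :: cs, res, up =>
    if c = '.' then pvGoA line cs (res ++ ['\t']) true
    else if c = '@' then res ++ '\t' :: line
    else pvGoA line cs (res ++ [if up then PySem.Chars.upperChar c else c]) false

def get_content_line (line : String) : String :=
  String.ofList (pvGoA line.toList line.toList [] true ++ ['\n'])

-- ===== PORT B =====
-- s[:1].upper() + s[1:]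
def pvCapL (s : List Char) : List Char :=
  PySem.Chars.upper (PySem.Chars.slice s none (some 1)) ++ PySem.Chars.slice s (some 1) none

def get_content_line_alt (line : String) : String :=
  let ls := line.toList
  let idx := PySem.Chars.find ls ['@']                                       -- line.find('@')
  let pref := if idx = -1 then ls else PySem.Chars.slice ls none (some idx)  -- line[:idx]
  let body := PySem.Chars.join ['\t'] ((PySem.Chars.splitOn pref ['.']).map pvCapL)
  String.ofList (if idx = -1 then body ++ ['\n'] else body ++ '\t' :: ls ++ ['\n'])

-- ===== PRECONDITION & SPEC =====
def Spec_get_content_line (line : String) (out : String) : Prop := out = get_content_line_alt line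
instance (line : String) (out : String) : Decidable (Spec_get_content_line line out) := by unfold Spec_get_content_line; infer_instance

-- ===== CLAIM (what is proved, stated in full; the proofs are below) =====
def Claim_equal_get_content_line : Prop := ∀ (line : String), Dom_get_content_line line → Spec_get_content_line line (get_content_line line)

-- ===== LEMMAS AND PROOFS =====

-- accumulator-free form of A's loop
def pvG (L : List Char) : List Char → Bool → List Char
  | [], _ => []
  | c :: cs, up =>
    if c = '.' then '\t' :: pvG L cs true
    else if c = '@' then '\t' :: L
    else (if up then PySem.Chars.upperChar c else c) :: pvG L cs false

lemma pvGoA_eq (L : List Char) : ∀ (cs res : List Char) (up : Bool),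
    pvGoA L cs res up = res ++ pvG L cs up := by
  intro cs
  induction cs with
  | nil => intro res up; simp [pvGoA, pvG]
  | cons c cs ih =>
    intro res up
    by_cases h1 : c = '.'
    · simp [pvGoA, pvG, h1, ih]
    · by_cases h2 : c = '@'
      · simp [pvGoA, pvG, h2]
      · simp [pvGoA, pvG, h1, h2, ih]

-- clean recursive model of str.split('.')
def pvSp : List Char → List (List Char)
  | [] => [[]]
  | c :: cs => if c = '.' then [] :: pvSp cs else (pvSp cs).modifyHead (c :: ·)

lemma pvSp_ne_nil : ∀ (cs : List Char), pvSp cs ≠ [] := by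
  intro cs
  induction cs with
  | nil => simp [pvSp]
  | cons c cs ih =>
    simp only [pvSp]
    split
    · simp
    · cases h : pvSp cs with
      | nil => exact absurd h ih
      | cons x xs => simp

lemma pvSplitOn_go_spec : ∀ (l : List Char) (fuel : Nat) (cur : List Char) (acc : List (List Char)),
    l.length ≤ fuel →
    PySem.Chars.splitOn.go ['.'] fuel l cur acc
      = acc.reverse ++ (pvSp l).modifyHead (cur.reverse ++ ·) := by
  intro l
  induction l with
  | nil =>
    intro fuel cur acc _
    cases fuel <;> simp [PySem.Chars.splitOn.go, pvSp]
  | cons c cs ih =>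
    intro fuel cur acc hlen
    cases fuel with
    | zero => simp at hlen
    | succ f =>
      have hf : cs.length ≤ f := by simpa using hlen
      by_cases hc : c = '.'
      · subst hc
        rw [show PySem.Chars.splitOn.go ['.'] (f + 1) ('.' :: cs) cur acc
              = PySem.Chars.splitOn.go ['.'] f cs [] (cur.reverse :: acc) from by
            simp [PySem.Chars.splitOn.go, List.isPrefixOf]]
        rw [ih f [] (cur.reverse :: acc) hf]
        cases hs : pvSp cs <;> simp [pvSp, hs]
      · rw [show PySem.Chars.splitOn.go ['.'] (f + 1) (c :: cs) cur acc
              = PySem.Chars.splitOn.go ['.'] f cs (c :: cur) acc from by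
            simp [PySem.Chars.splitOn.go, List.isPrefixOf, Ne.symm hc]]
        rw [ih f (c :: cur) acc hf]
        cases h : pvSp cs with
        | nil => exact absurd h (pvSp_ne_nil cs)
        | cons x xs => simp [pvSp, hc, h]

lemma pvSplitOn_eq_pvSp (l : List Char) : PySem.Chars.splitOn l ['.'] = pvSp l := by
  have h := pvSplitOn_go_spec l (l.length + 1) [] [] (by omega)
  cases hs : pvSp l with
  | nil => exact absurd hs (pvSp_ne_nil l)
  | cons x xs => simpa [PySem.Chars.splitOn, hs] using h

lemma pvCapL_nil : pvCapL [] = [] := by decide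

lemma pvCapL_cons (c : Char) (cs : List Char) :
    pvCapL (c :: cs) = PySem.Chars.upperChar c :: cs := by
  have h1 : PySem.List.slice (c :: cs) none (some 1) = [c] := by
    simpa using PySem.List.slice_to_natCast (c :: cs) 1
  have h2 : PySem.List.slice (c :: cs) (some 1) none = cs := by
    simpa using PySem.List.slice_from_one (c :: cs)
  simp [pvCapL, PySem.Chars.slice, PySem.Chars.upper, h1, h2]

-- '\t'.join as a clean recursion
def pvJ : List (List Char) → List Char
  | [] => []
  | [x] => x
  | x :: y :: t => x ++ '\t' :: pvJ (y :: t)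

lemma pvJoin_eq : ∀ (ps : List (List Char)), PySem.Chars.join ['\t'] ps = pvJ ps := by
  intro ps
  induction ps with
  | nil => simp [PySem.Chars.join, List.intercalate, pvJ]
  | cons x t ih =>
    cases t with
    | nil => simp [PySem.Chars.join, List.intercalate, pvJ]
    | cons y t' =>
      rw [PySem.Chars.join_cons_cons, ih]
      simp [pvJ]

lemma pvJ_cons_head (c : Char) (h : List Char) (t : List (List Char)) :
    pvJ ((c :: h) :: t) = c :: pvJ (h :: t) := by
  cases t <;> simp [pvJ]

-- segments after the first get their first char uppercased; the first one only if up
def pvCaps (up : Bool) (ps : List (List Char)) : List (List Char) :=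
  if up then ps.map pvCapL
  else match ps with
    | [] => []
    | x :: xs => x :: xs.map pvCapL

lemma pvCaps_cons (up : Bool) (h : List Char) (t : List (List Char)) :
    pvCaps up (h :: t) = (if up then pvCapL h else h) :: t.map pvCapL := by
  cases up <;> simp [pvCaps]

lemma pvG_no_at (L : List Char) : ∀ (cs : List Char) (up : Bool), '@' ∉ cs →
    pvG L cs up = pvJ (pvCaps up (pvSp cs)) := by
  intro cs
  induction cs with
  | nil => intro up _; cases up <;> simp [pvG, pvSp, pvCaps, pvCapL_nil, pvJ]
  | cons c cs ih =>
    intro up hmem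
    simp only [List.mem_cons, not_or] at hmem
    obtain ⟨hc, hcs⟩ := hmem
    obtain ⟨h, t, hsp⟩ : ∃ h t, pvSp cs = h :: t := by
      cases hs : pvSp cs with
      | nil => exact absurd hs (pvSp_ne_nil cs)
      | cons h t => exact ⟨h, t, rfl⟩
    by_cases hdot : c = '.'
    · subst hdot
      rw [show pvG L ('.' :: cs) up = '\t' :: pvG L cs true from by simp [pvG]]
      rw [ih true hcs]
      rw [show pvSp ('.' :: cs) = [] :: pvSp cs from by simp [pvSp]]
      rw [hsp, pvCaps_cons, pvCaps_cons]
      cases t <;> cases up <;> simp [pvJ, pvCapL_nil]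
    · have hat : ¬(c = '@') := fun h => hc h.symm
      rw [show pvG L (c :: cs) up
            = (if up then PySem.Chars.upperChar c else c) :: pvG L cs false from by
          simp [pvG, hdot, hat]]
      rw [ih false hcs]
      rw [show pvSp (c :: cs) = (pvSp cs).modifyHead (c :: ·) from by simp [pvSp, hdot]]
      rw [hsp]
      simp only [List.modifyHead_cons]
      rw [pvCaps_cons, pvCaps_cons]
      cases up
      · simp [pvJ_cons_head]
      · simp [pvCapL_cons, pvJ_cons_head]

lemma pvG_at (L : List Char) : ∀ (cs : List Char) (up : Bool), '@' ∈ cs →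
    pvG L cs up = pvJ (pvCaps up (pvSp (cs.takeWhile (· ≠ '@')))) ++ '\t' :: L := by
  intro cs
  induction cs with
  | nil => intro up h; simp at h
  | cons c cs ih =>
    intro up hmem
    by_cases hat : c = '@'
    · subst hat
      rw [show pvG L ('@' :: cs) up = '\t' :: L from by simp [pvG]]
      cases up <;> simp [List.takeWhile, pvSp, pvCaps, pvCapL_nil, pvJ]
    · have hcs : '@' ∈ cs := by
        rcases List.mem_cons.mp hmem with h' | h'
        · exact absurd h'.symm hat
        · exact h'
      have htw : (c :: cs).takeWhile (· ≠ '@') = c :: cs.takeWhile (· ≠ '@') := by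
        simp [hat]
      rw [htw]
      obtain ⟨h, t, hsp⟩ : ∃ h t, pvSp (cs.takeWhile (· ≠ '@')) = h :: t := by
        cases hs : pvSp (cs.takeWhile (· ≠ '@')) with
        | nil => exact absurd hs (pvSp_ne_nil _)
        | cons h t => exact ⟨h, t, rfl⟩
      by_cases hdot : c = '.'
      · subst hdot
        rw [show pvG L ('.' :: cs) up = '\t' :: pvG L cs true from by simp [pvG]]
        rw [ih true hcs]
        rw [show pvSp ('.' :: cs.takeWhile (· ≠ '@')) = [] :: pvSp (cs.takeWhile (· ≠ '@'))
              from by simp [pvSp]]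
        rw [hsp, pvCaps_cons, pvCaps_cons]
        cases t <;> cases up <;> simp [pvJ, pvCapL_nil]
      · rw [show pvG L (c :: cs) up
              = (if up then PySem.Chars.upperChar c else c) :: pvG L cs false from by
            simp [pvG, hdot, hat]]
        rw [ih false hcs]
        rw [show pvSp (c :: cs.takeWhile (· ≠ '@'))
              = (pvSp (cs.takeWhile (· ≠ '@'))).modifyHead (c :: ·) from by simp [pvSp, hdot]]
        rw [hsp]
        simp only [List.modifyHead_cons]
        rw [pvCaps_cons, pvCaps_cons]
        cases up
        · simp [pvJ_cons_head]
        · simp [pvCapL_cons, pvJ_cons_head]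

lemma pvFind_go_of_not_mem (c : Char) : ∀ (l : List Char) (k : Nat), c ∉ l →
    PySem.Chars.find.go [c] l k = -1 := by
  intro l
  induction l with
  | nil => intro k _; simp [PySem.Chars.find.go]
  | cons x xs ih =>
    intro k h
    simp only [List.mem_cons, not_or] at h
    simp [PySem.Chars.find.go, List.isPrefixOf, h.1, ih _ h.2]

lemma pvFind_go_of_mem (c : Char) : ∀ (l : List Char) (k : Nat), c ∈ l →
    PySem.Chars.find.go [c] l k = ((k + (l.takeWhile (· ≠ c)).length : Nat) : Int) := by
  intro l
  induction l with
  | nil => intro k h; simp at h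
  | cons x xs ih =>
    intro k h
    by_cases hx : x = c
    · subst hx; simp [PySem.Chars.find.go, List.isPrefixOf, List.takeWhile]
    · have hmem : c ∈ xs := by
        rcases List.mem_cons.mp h with h' | h'
        · exact absurd h'.symm hx
        · exact h'
      have htw : (x :: xs).takeWhile (· ≠ c) = x :: xs.takeWhile (· ≠ c) := by
        simp [hx]
      rw [htw]
      simp [PySem.Chars.find.go, List.isPrefixOf, Ne.symm hx, ih (k + 1) hmem]
      omega

lemma pvTake_len_takeWhile {α : Type} (p : α → Bool) : ∀ (l : List α),
    List.take ((l.takeWhile p).length) l = l.takeWhile p := by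
  intro l
  induction l with
  | nil => simp
  | cons c cs ih =>
    cases hp : p c <;> simp [hp, ih]

-- ===== VERDICT (by name: the statement is the Claim_ definition above) =====
theorem get_content_line_spec : Claim_equal_get_content_line := by
  intro line _
  unfold Spec_get_content_line get_content_line get_content_line_alt
  set ls := line.toList with hls
  by_cases hmem : '@' ∈ ls
  · have hfind : PySem.Chars.find ls ['@'] = (((ls.takeWhile (· ≠ '@')).length : Nat) : Int) := by
      simpa [PySem.Chars.find] using pvFind_go_of_mem '@' ls 0 hmem
    have hne : PySem.Chars.find ls ['@'] ≠ -1 := by rw [hfind]; omega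
    have hslice : PySem.Chars.slice ls none (some (PySem.Chars.find ls ['@'])) =
        ls.takeWhile (· ≠ '@') := by
      rw [hfind]
      show PySem.List.slice ls none (some _) = _
      rw [PySem.List.slice_to_natCast]
      exact pvTake_len_takeWhile _ ls
    simp only [if_neg hne]
    rw [pvGoA_eq, pvG_at ls ls true hmem, hslice, pvSplitOn_eq_pvSp, pvJoin_eq]
    simp [pvCaps]
  · have hfind : PySem.Chars.find ls ['@'] = -1 := by
      simpa [PySem.Chars.find] using pvFind_go_of_not_mem '@' ls 0 hmem
    simp only [hfind, ite_true]
    rw [pvGoA_eq, pvG_no_at ls ls true hmem, pvSplitOn_eq_pvSp, pvJoin_eq]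
    simp [pvCaps]
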